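-- pv_equiv track=rewrite | github.com/pjunes/Algo_Prob | DP/sum of sub arrays 2143/2143_.py | solution
-- ===== SOURCE A (Python) =====
-- def solution(T, n, A, m, B):
--     answer = 0
--
--     A_sum = [A[i] for i in range(n)]
--     for i in range(1, n):
--         A_sum[i] += A_sum[i-1]
--     A_sum.insert(0, 0)
--
--     B_sum = [B[i] for i in range(m)]
--     for j in range(1, m):
--         B_sum[j] += B_sum[j-1]
--     B_sum.insert(0, 0)
--
--     A_dict = dict()
--     B_dict = dict()
--
--     for start in range(n):
--         for end in range(start+1, n+1):
--             key = A_sum[end] - A_sum[start]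
--             A_dict[key] = A_dict.get(key, 0) + 1
--
--     for start in range(m):
--         for end in range(start+1, m+1):
--             key = B_sum[end] - B_sum[start]
--             B_dict[key] = B_dict.get(key, 0) + 1
--
--     for A_key in A_dict.keys():
--         B_key = T - A_key
--         if B_dict.get(B_key, 0):
--             answer += A_dict[A_key] * B_dict[B_key]
--
--     return answer
-- ===== SOURCE B (Python) =====
-- def solution(T, n, A, m, B):
--     # Sort both lists of subarray sums and count matching pairs with a
--     # run-skipping two-pointer merge: no hash tables at all.
--     sa = []
--     for i in range(n):
--         s = 0
--         for j in range(i, n):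
--             s += A[j]
--             sa.append(s)
--     sb = []
--     for i in range(m):
--         s = 0
--         for j in range(i, m):
--             s += B[j]
--             sb.append(T - s)
--     sa.sort()
--     sb.sort()
--     answer = 0
--     i = 0
--     j = 0
--     while i < len(sa) and j < len(sb):
--         if sa[i] < sb[j]:
--             i += 1
--         elif sb[j] < sa[i]:
--             j += 1
--         else:
--             v = sa[i]
--             ci = 0
--             while i < len(sa) and sa[i] == v:
--                 i += 1
--                 ci += 1
--             cj = 0
--             while j < len(sb) and sb[j] == v:
--                 j += 1
--                 cj += 1
--             answer += ci * cj
--     return answer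
-- ===== Notes on version B (the rewrite author's own statement) =====
-- stated objective: alternative
-- what changed: B replaces A's two hash dicts and cross-matching loop with sorting: it collects both lists of subarray sums (B's already transformed to T - s), sorts them, and counts matching pairs with a run-skipping two-pointer merge, multiplying run lengths.
import Mathlib
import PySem

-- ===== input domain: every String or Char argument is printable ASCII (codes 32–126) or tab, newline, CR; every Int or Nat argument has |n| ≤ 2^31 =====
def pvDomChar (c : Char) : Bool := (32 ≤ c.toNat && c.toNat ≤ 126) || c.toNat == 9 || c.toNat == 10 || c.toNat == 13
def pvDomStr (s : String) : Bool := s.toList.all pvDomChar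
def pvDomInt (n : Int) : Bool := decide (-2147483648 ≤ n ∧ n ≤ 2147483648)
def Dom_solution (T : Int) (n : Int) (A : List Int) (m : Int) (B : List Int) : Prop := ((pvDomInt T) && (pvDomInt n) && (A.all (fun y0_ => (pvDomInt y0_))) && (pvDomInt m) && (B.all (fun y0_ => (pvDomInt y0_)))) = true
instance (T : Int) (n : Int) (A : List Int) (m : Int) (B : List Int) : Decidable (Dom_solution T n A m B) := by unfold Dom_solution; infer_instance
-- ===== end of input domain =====

-- B sorts both lists of subarray sums and counts matching pairs with a run-skipping
-- two-pointer merge — sorting + merging instead of A's two hash dicts and cross-matching loop.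

-- ===== PORT A =====
def solution (T : Int) (n : Int) (A : List Int) (m : Int) (B : List Int) : Int :=
  let answer : Int := 0
  let aSum0 : List Int := (PySem.List.pyRange 0 n 1).map (fun i => PySem.List.pyGetD A i 0)
  let aSum1 : List Int := (PySem.List.pyRange 1 n 1).foldl
      (fun s i => PySem.List.pySetD s i (PySem.List.pyGetD s i 0 + PySem.List.pyGetD s (i-1) 0)) aSum0
  let aSum : List Int := 0 :: aSum1
  let bSum0 : List Int := (PySem.List.pyRange 0 m 1).map (fun j => PySem.List.pyGetD B j 0)
  let bSum1 : List Int := (PySem.List.pyRange 1 m 1).foldl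
      (fun s j => PySem.List.pySetD s j (PySem.List.pyGetD s j 0 + PySem.List.pyGetD s (j-1) 0)) bSum0
  let bSum : List Int := 0 :: bSum1
  let aDict : PySem.Dict Int Int := (PySem.List.pyRange 0 n 1).foldl (fun d start =>
      (PySem.List.pyRange (start+1) (n+1) 1).foldl (fun d e =>
        let key := PySem.List.pyGetD aSum e 0 - PySem.List.pyGetD aSum start 0
        d.insert key (d.getD key 0 + 1)) d) PySem.Dict.empty
  let bDict : PySem.Dict Int Int := (PySem.List.pyRange 0 m 1).foldl (fun d start =>
      (PySem.List.pyRange (start+1) (m+1) 1).foldl (fun d e =>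
        let key := PySem.List.pyGetD bSum e 0 - PySem.List.pyGetD bSum start 0
        d.insert key (d.getD key 0 + 1)) d) PySem.Dict.empty
  let answer := aDict.keys.foldl (fun acc k =>
      let bk := T - k
      if bDict.getD bk 0 ≠ 0 then acc + aDict.getD k 0 * bDict.getD bk 0 else acc) answer
  answer

-- ===== PORT B =====
-- run-skipping two-pointer merge over two ascending lists (the while-loop of Source B:
-- advance past the run of equal values on each side, counting its length with takeWhile/dropWhile)
def mergeCountAux : Nat → List Int → List Int → Int
  | 0, _, _ => 0
  | _ + 1, [], _ => 0
  | _ + 1, _ :: _, [] => 0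
  | k + 1, x :: xt, y :: yt =>
    if x < y then mergeCountAux k xt (y :: yt)
    else if y < x then mergeCountAux k (x :: xt) yt
    else
      let ci := ((x :: xt).takeWhile (fun z => z == x)).length
      let cj := ((y :: yt).takeWhile (fun z => z == x)).length
      (ci : Int) * (cj : Int)
        + mergeCountAux k ((x :: xt).dropWhile (fun z => z == x)) ((y :: yt).dropWhile (fun z => z == x))

def mergeCount (xs ys : List Int) : Int :=
  mergeCountAux (xs.length + ys.length) xs ys

def solution_alt (T : Int) (n : Int) (A : List Int) (m : Int) (B : List Int) : Int :=
  let sa : List Int := (PySem.List.pyRange 0 n 1).foldl (fun l i =>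
      ((PySem.List.pyRange i n 1).foldl (fun (p : Int × List Int) j =>
          let s := p.1 + PySem.List.pyGetD A j 0
          (s, p.2 ++ [s])) (0, l)).2) []
  let sb : List Int := (PySem.List.pyRange 0 m 1).foldl (fun l i =>
      ((PySem.List.pyRange i m 1).foldl (fun (p : Int × List Int) j =>
          let s := p.1 + PySem.List.pyGetD B j 0
          (s, p.2 ++ [T - s])) (0, l)).2) []
  let sa' := PySem.List.sorted sa (fun x => x) false
  let sb' := PySem.List.sorted sb (fun x => x) false
  mergeCount sa' sb'

-- ===== PRECONDITION & SPEC =====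
-- Pre_ excludes exactly the inputs where Python A raises IndexError: n > len(A) or m > len(B)
-- (the comprehensions A[i] for i in range(n) / B[i] for i in range(m) go out of range; B raises there too).
def Pre_solution (T : Int) (n : Int) (A : List Int) (m : Int) (B : List Int) : Prop :=
  n ≤ (A.length : Int) ∧ m ≤ (B.length : Int)
instance (T : Int) (n : Int) (A : List Int) (m : Int) (B : List Int) : Decidable (Pre_solution T n A m B) := by unfold Pre_solution; infer_instance
def pvWitness_solution : Int × Int × List Int × Int × List Int := (3, 2, [1, 2], 2, [1, 2])
def Spec_solution (T : Int) (n : Int) (A : List Int) (m : Int) (B : List Int) (out : Int) : Prop := out = solution_alt T n A m B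
instance (T : Int) (n : Int) (A : List Int) (m : Int) (B : List Int) (out : Int) : Decidable (Spec_solution T n A m B out) := by unfold Spec_solution; infer_instance

-- ===== CLAIM (what is proved, stated in full; the proofs are below) =====
def Claim_equal_solution : Prop := ∀ (T : Int) (n : Int) (A : List Int) (m : Int) (B : List Int), Dom_solution T n A m B → Pre_solution T n A m B → Spec_solution T n A m B (solution T n A m B)

-- ===== LEMMAS AND PROOFS =====

-- running sums of ys starting from accumulator c
def runSums (c : Int) : List Int → List Int
  | [] => []
  | a :: t => (c + a) :: runSums (c + a) t

-- all subarray sums of xs, grouped by start index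
def subSums (xs : List Int) : List Int :=
  (List.range xs.length).flatMap (fun i => runSums 0 (xs.drop i))

-- named pieces of the two ports (definitionally equal to the ports' let-chains)
def prefixArr (L : List Int) (n : Int) : List Int :=
  0 :: (PySem.List.pyRange 1 n 1).foldl
      (fun s i => PySem.List.pySetD s i (PySem.List.pyGetD s i 0 + PySem.List.pyGetD s (i-1) 0))
      ((PySem.List.pyRange 0 n 1).map (fun i => PySem.List.pyGetD L i 0))

def dictA (L : List Int) (n : Int) : PySem.Dict Int Int :=
  (PySem.List.pyRange 0 n 1).foldl (fun d start =>
    (PySem.List.pyRange (start+1) (n+1) 1).foldl (fun d e =>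
      d.insert (PySem.List.pyGetD (prefixArr L n) e 0 - PySem.List.pyGetD (prefixArr L n) start 0)
        (d.getD (PySem.List.pyGetD (prefixArr L n) e 0 - PySem.List.pyGetD (prefixArr L n) start 0) 0 + 1)) d)
    PySem.Dict.empty

def finalA (T : Int) (da db : PySem.Dict Int Int) : Int :=
  da.keys.foldl (fun acc k =>
    if db.getD (T - k) 0 ≠ 0 then acc + da.getD k 0 * db.getD (T - k) 0 else acc) 0

def genList (f : Int → Int) (L : List Int) (n : Int) : List Int :=
  (PySem.List.pyRange 0 n 1).foldl (fun l i =>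
      ((PySem.List.pyRange i n 1).foldl (fun (p : Int × List Int) j =>
          (p.1 + PySem.List.pyGetD L j 0, p.2 ++ [f (p.1 + PySem.List.pyGetD L j 0)])) (0, l)).2) []

theorem runSums_eq (ys : List Int) : ∀ c : Int,
    runSums c ys = (List.range ys.length).map (fun k => c + (ys.take (k + 1)).sum) := by
  induction ys with
  | nil => intro c; simp [runSums]
  | cons a t ih =>
    intro c
    simp only [runSums, List.length_cons, List.range_succ_eq_map, List.map_cons, List.map_map]
    refine List.cons_eq_cons.mpr ⟨by simp, ?_⟩
    rw [ih (c + a)]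
    apply List.map_congr_left
    intro k _
    simp [List.take_succ_cons, add_assoc]

theorem map_pyGetD_range_take (A : List Int) (n : Int) (h : n ≤ (A.length : Int)) :
    (PySem.List.pyRange 0 n 1).map (fun i => PySem.List.pyGetD A i 0) = A.take n.toNat := by
  rw [PySem.List.pyRange_zero]
  rw [List.map_map]
  apply List.ext_getElem
  · simp; omega
  · intro k h1 h2
    simp only [List.getElem_map, List.getElem_range, Function.comp_apply]
    rw [PySem.List.pyGetD_natCast]
    simp at h1
    rw [List.getElem_take]
    exact List.getD_eq_getElem _ _ (by omega)

theorem prefix_fold (xs : List Int) (j : Nat) (hj : j ≤ xs.length) :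
    (PySem.List.pyRange 1 (j : Int) 1).foldl
      (fun s i => PySem.List.pySetD s i (PySem.List.pyGetD s i 0 + PySem.List.pyGetD s (i-1) 0)) xs
    = ((List.range j).map (fun k => (xs.take (k + 1)).sum)) ++ xs.drop j := by
  induction j with
  | zero => simp [PySem.List.pyRange_one_eq_nil]
  | succ j ih =>
    have hj' : j ≤ xs.length := by omega
    rcases Nat.eq_zero_or_pos j with h0 | hpos
    · subst h0
      have h1 : ((0 + 1 : Nat) : Int) = 1 := by norm_num
      rw [h1, PySem.List.pyRange_one_eq_nil (le_refl 1)]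
      simp only [List.foldl_nil, Nat.zero_add, List.range_one, List.map_cons, List.map_nil]
      rcases xs with _ | ⟨a, t⟩
      · simp at hj
      · simp
    · have hcast : ((j : Int) + 1) = ((j + 1 : Nat) : Int) := by push_cast; ring
      rw [← hcast, PySem.List.pyRange_one_succ_right (by exact_mod_cast hpos), List.foldl_append]
      rw [ih hj']
      set P := (List.range j).map (fun k => (xs.take (k + 1)).sum) with hP
      have hPlen : P.length = j := by simp [hP]
      simp only [List.foldl_cons, List.foldl_nil]
      have hget1 : PySem.List.pyGetD (P ++ xs.drop j) (j : Int) 0 = xs[j]'(by omega) := by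
        rw [PySem.List.pyGetD_natCast]
        rw [List.getD_eq_getElem _ _ (by simp only [List.length_append, List.length_drop, hPlen]; omega)]
        rw [List.getElem_append_right (by omega)]
        simp [hPlen]
      have hget2 : PySem.List.pyGetD (P ++ xs.drop j) ((j : Int) - 1) 0 = (xs.take j).sum := by
        have h2 : ((j : Int) - 1) = ((j - 1 : Nat) : Int) := by push_cast [hpos]; omega
        rw [h2, PySem.List.pyGetD_natCast]
        rw [List.getD_eq_getElem _ _ (by simp only [List.length_append, List.length_drop, hPlen]; omega)]
        rw [List.getElem_append_left (by omega)]
        simp only [hP, List.getElem_map, List.getElem_range]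
        have h3 : j - 1 + 1 = j := by omega
        rw [h3]
      rw [hget1, hget2]
      rw [PySem.List.pySetD_natCast]
      apply List.ext_getElem
      · simp only [List.length_set, List.length_append, List.length_drop, List.length_map,
          List.length_range, hPlen]
        omega
      · intro k hk1 hk2
        simp only [List.length_set, List.length_append, List.length_drop, hPlen] at hk1
        by_cases hkj : k = j
        · subst hkj
          rw [List.getElem_set_self (by simp only [List.length_set, List.length_append, List.length_drop, hPlen]; omega)]
          rw [List.getElem_append_left (by simp only [List.length_map, List.length_range]; omega)]
          simp only [List.getElem_map, List.getElem_range]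
          rw [List.take_add_one]
          rw [List.sum_append]
          simp [List.getElem?_eq_getElem (show k < xs.length by omega)]
          ring
        · rw [List.getElem_set_ne (by omega)]
          by_cases hlt : k < j
          · rw [List.getElem_append_left (by simp only [hPlen]; omega),
                List.getElem_append_left (by simp only [List.length_map, List.length_range]; omega)]
            simp [hP]
          · have hkgt : j < k := by omega
            rw [List.getElem_append_right (by simp only [hPlen]; omega),
                List.getElem_append_right (by simp only [List.length_map, List.length_range]; omega)]
            rw [List.getElem_drop, List.getElem_drop]
            congr 1
            simp only [hPlen, List.length_map, List.length_range]
            omega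

theorem foldl_insert_key {γ : Type} (l : List γ) (key : γ → Int) (d : PySem.Dict Int Int) :
    l.foldl (fun d e => d.insert (key e) (d.getD (key e) 0 + 1)) d
      = (l.map key).foldl (fun d x => d.insert x (d.getD x 0 + 1)) d := by
  rw [List.foldl_map]

theorem pair_fold_list (f : Int → Int) (ys : List Int) : ∀ (c : Int) (acc : List Int),
    (ys.foldl (fun (p : Int × List Int) a =>
        (p.1 + a, p.2 ++ [f (p.1 + a)])) (c, acc))
      = (c + ys.sum, acc ++ (runSums c ys).map f) := by
  induction ys with
  | nil => intro c acc; simp [runSums]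
  | cons a t ih =>
    intro c acc
    simp only [List.foldl_cons, runSums, List.sum_cons, List.map_cons]
    rw [ih]
    simp [add_assoc]

theorem cross (SA SB : List Int) (T : Int) :
    ((PySem.List.dedup SA).map (fun k => ((SA.count k : Int)) * ((SB.count (T - k) : Int)))).sum
      = (SB.map (fun s => ((SA.count (T - s) : Int)))).sum := by
  classical
  set f : Int → Int := fun k => ((SA.count k : Int)) * ((SB.count (T - k) : Int)) with hf
  have hRHS : (SB.map (fun s => ((SA.count (T - s) : Int)))).sum
      = ∑ x ∈ SB.toFinset, (SB.count x : Int) * (SA.count (T - x) : Int) := by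
    rw [Finset.sum_list_map_count]
    simp
  have hdedupFin : (PySem.List.dedup SA).toFinset = SA.toFinset := by
    ext x; simp
  have hLHS : ((PySem.List.dedup SA).map f).sum = ∑ k ∈ SA.toFinset, f k := by
    rw [← hdedupFin, List.sum_toFinset _ (PySem.List.nodup_dedup SA)]
  rw [hLHS, hRHS]
  set U : Finset Int := SA.toFinset ∪ SB.toFinset.image (fun m => T - m) with hU
  have hL : ∑ k ∈ SA.toFinset, f k = ∑ k ∈ U, f k := by
    apply Finset.sum_subset (Finset.subset_union_left)
    intro k _ hk
    simp only [hf]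
    have : SA.count k = 0 := by
      rw [List.count_eq_zero]
      intro hmem; exact hk (List.mem_toFinset.mpr hmem)
    simp [this]
  have hR : ∑ x ∈ SB.toFinset, (SB.count x : Int) * (SA.count (T - x) : Int)
      = ∑ k ∈ SB.toFinset.image (fun m => T - m), f k := by
    rw [Finset.sum_image (by intro a _ b _ h; simp only [] at h; omega)]
    apply Finset.sum_congr rfl
    intro x _
    simp only [hf]
    have : T - (T - x) = x := by ring
    rw [this, mul_comm]
  have hR2 : ∑ k ∈ SB.toFinset.image (fun m => T - m), f k = ∑ k ∈ U, f k := by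
    apply Finset.sum_subset (Finset.subset_union_right)
    intro k _ hk
    simp only [hf]
    have : SB.count (T - k) = 0 := by
      rw [List.count_eq_zero]
      intro hmem
      exact hk (Finset.mem_image.mpr ⟨T - k, List.mem_toFinset.mpr hmem, by ring⟩)
    simp [this]
  rw [hL, hR, hR2]

theorem pyRange_one_toNat (a n : Int) (ha : 1 ≤ a) :
    PySem.List.pyRange a n 1 = PySem.List.pyRange a (n.toNat : Int) 1 := by
  by_cases h : 0 ≤ n
  · rw [Int.toNat_of_nonneg h]
  · rw [PySem.List.pyRange_one_eq_nil (by omega), PySem.List.pyRange_one_eq_nil (by omega)]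

theorem prefixArr_eq (L : List Int) (n : Int) (h : n ≤ (L.length : Int)) :
    prefixArr L n = (List.range (n.toNat + 1)).map (fun k => ((L.take n.toNat).take k).sum) := by
  unfold prefixArr
  rw [map_pyGetD_range_take L n h, pyRange_one_toNat 1 n (le_refl 1)]
  have hlen : (L.take n.toNat).length = n.toNat := by
    rw [List.length_take]; omega
  rw [show ((n.toNat : Int)) = ((L.take n.toNat).length : Int) by rw [hlen]]
  rw [prefix_fold (L.take n.toNat) (L.take n.toNat).length (le_refl _)]
  rw [List.drop_length, List.append_nil]
  rw [hlen, List.range_succ_eq_map, List.map_cons]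
  simp only [List.take_zero, List.sum_nil, List.map_map]
  rfl

theorem get_prefixArr (L : List Int) (n : Int) (h : n ≤ (L.length : Int))
    (e : Int) (h0 : 0 ≤ e) (h1 : e ≤ (n.toNat : Int)) :
    PySem.List.pyGetD (prefixArr L n) e 0 = ((L.take n.toNat).take e.toNat).sum := by
  rw [prefixArr_eq L n h]
  rw [PySem.List.pyGetD_eq_getElem _ _ h0 (by simp only [List.length_map, List.length_range]; omega)]
  simp only [List.getElem_map, List.getElem_range]

theorem drop_take_sub (xs : List Int) (i u : Nat) :
    ((xs.take (i + u)).sum : Int) - (xs.take i).sum = ((xs.drop i).take u).sum := by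
  rw [List.take_add, List.sum_append]
  ring

theorem foldl_keylists_counter (N : Nat) (K : Nat → List Int) :
    (List.range N).foldl (fun d i => (K i).foldl (fun d x => d.insert x (d.getD x 0 + 1)) d)
      PySem.Dict.empty
    = PySem.Dict.counter ((List.range N).flatMap K) := by
  rw [← PySem.Dict.foldl_insert_getD_add_one_eq_counter, List.foldl_flatMap]

theorem dictA_eq (L : List Int) (n : Int) (h : n ≤ (L.length : Int)) :
    dictA L n = PySem.Dict.counter (subSums (L.take n.toNat)) := by
  set N := n.toNat with hN
  set L' := L.take N with hL'
  have hL'len : L'.length = N := by rw [hL', List.length_take]; omega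
  unfold dictA
  rw [PySem.List.pyRange_zero n, List.foldl_map]
  rw [PySem.List.foldl_congr_mem _ _
    (fun d (i : Nat) => (runSums 0 (L'.drop i)).foldl (fun d x => d.insert x (d.getD x 0 + 1)) d)
    _ ?_]
  · rw [foldl_keylists_counter]
    congr 1
    unfold subSums
    rw [hL'len]
  · intro d i hi
    rw [List.mem_range] at hi
    have hn : n = (N : Int) := by omega
    rw [foldl_insert_key]
    congr 1
    have hlen2 : (L'.drop i).length = N - i := by rw [List.length_drop, hL'len]
    rw [runSums_eq, hlen2]
    rw [show n + 1 = ((N : Int) + 1) by omega]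
    rw [PySem.List.pyRange_one, List.map_map]
    have hcnt : ((N : Int) + 1 - ((i : Int) + 1)).toNat = N - i := by omega
    rw [hcnt]
    apply List.map_congr_left
    intro k hk
    rw [List.mem_range] at hk
    simp only [Function.comp_apply]
    rw [get_prefixArr L n h _ (by omega) (by omega),
        get_prefixArr L n h _ (by omega) (by omega)]
    rw [show ((i : Int) + 1 + (k : Int)).toNat = i + (k + 1) by omega,
        show ((i : Int)).toNat = i by omega]
    rw [← hN, ← hL', drop_take_sub L' i (k + 1)]
    ring

theorem pyGetD_take_eq (L : List Int) (N : Nat) (hN : N ≤ L.length)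
    (j : Int) (h0 : 0 ≤ j) (h1 : j < (N : Int)) :
    PySem.List.pyGetD L j 0 = PySem.List.pyGetD (L.take N) j 0 := by
  rw [PySem.List.pyGetD_eq_getElem _ _ h0 (by omega),
      PySem.List.pyGetD_eq_getElem _ _ h0 (by rw [List.length_take]; push_cast; omega)]
  rw [List.getElem_take]

theorem genList_eq (f : Int → Int) (L : List Int) (n : Int) (h : n ≤ (L.length : Int)) :
    genList f L n = (subSums (L.take n.toNat)).map f := by
  set N := n.toNat with hN
  set L' := L.take N with hL'
  have hL'len : L'.length = N := by rw [hL', List.length_take]; omega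
  unfold genList
  rw [PySem.List.pyRange_zero n, List.foldl_map]
  rw [PySem.List.foldl_congr_mem _ _
    (fun l (i : Nat) => l ++ (runSums 0 (L'.drop i)).map f) _ ?_]
  · rw [PySem.List.foldl_append_eq_flatMap]
    rw [List.nil_append]
    rw [show subSums L' = (List.range N).flatMap (fun i => runSums 0 (L'.drop i)) by
      unfold subSums; rw [hL'len]]
    rw [List.map_flatMap]
  · intro l i hi
    rw [List.mem_range] at hi
    have hn : n = (N : Int) := by omega
    simp only []
    rw [PySem.List.foldl_congr_mem _ _
      (fun (p : Int × List Int) j =>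
        (p.1 + PySem.List.pyGetD L' j 0, p.2 ++ [f (p.1 + PySem.List.pyGetD L' j 0)])) _ ?_]
    · rw [hn, show ((N : Int)) = ((L'.length : Int)) by rw [hL'len]]
      rw [PySem.List.foldl_pyRange_pyGetD' L' 0
        (fun (p : Int × List Int) a => (p.1 + a, p.2 ++ [f (p.1 + a)]))
        ((0 : Int), l) (by positivity)]
      rw [pair_fold_list]
      simp only [Int.toNat_natCast]
    · intro p j hj
      rw [PySem.List.mem_pyRange_one] at hj
      simp only [hL']
      rw [pyGetD_take_eq L N (by omega) j (by omega) (by omega)]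

theorem finalA_counter (T : Int) (SA SB : List Int) :
    finalA T (PySem.Dict.counter SA) (PySem.Dict.counter SB)
      = ((PySem.List.dedup SA).map (fun k => ((SA.count k : Int)) * ((SB.count (T - k) : Int)))).sum := by
  unfold finalA
  rw [PySem.Dict.keys_counter, ← PySem.List.dedup_eq_ofList]
  simp only [PySem.Dict.getD_counter]
  rw [PySem.List.foldl_congr_mem _ _
    (fun acc k => acc + ((SA.count k : Int)) * ((SB.count (T - k) : Int))) _ ?_]
  · rw [PySem.List.foldl_add, zero_add]
  · intro acc k _
    by_cases hc : ((SB.count (T - k) : Int)) = 0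
    · simp [hc]
    · simp only [ne_eq, hc, not_false_eq_true, if_true]

-- sorted-run structure: in an ascending list whose elements are all ≥ x, the leading
-- run of x's has length count x, and everything after it is > x
theorem sorted_head_split (x : Int) (xs : List Int) (hx : xs.Pairwise (· ≤ ·))
    (hge : ∀ z ∈ xs, x ≤ z) :
    (xs.takeWhile (fun z => z == x)).length = xs.count x ∧
      ∀ z ∈ xs.dropWhile (fun z => z == x), x < z := by
  induction xs with
  | nil => simp
  | cons a t ih =>
    rcases List.pairwise_cons.mp hx with ⟨hat, ht⟩
    by_cases hax : a = x
    · subst hax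
      rw [List.takeWhile_cons_of_pos (by simp), List.dropWhile_cons_of_pos (by simp)]
      have := ih ht (fun z hz => hat z hz)
      simp only [List.length_cons, List.count_cons_self]
      exact ⟨by omega, this.2⟩
    · have hax' : x < a := lt_of_le_of_ne (hge a (by simp)) (Ne.symm hax)
      rw [List.takeWhile_cons_of_neg (by simp [hax]), List.dropWhile_cons_of_neg (by simp [hax])]
      constructor
      · have hcnt : List.count x (a :: t) = 0 := List.count_eq_zero.mpr (by
          intro hmem
          rcases List.mem_cons.mp hmem with h | h
          · exact hax h.symm
          · exact absurd (hat x h) (by omega))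
        simp [hcnt]
      · intro z hz
        rcases List.mem_cons.mp hz with h | h
        · omega
        · have := hat z h; omega

-- correctness of the run-skipping merge on two ascending lists
theorem mergeCountAux_eq : ∀ (k : Nat) (xs ys : List Int), xs.length + ys.length ≤ k →
    xs.Pairwise (· ≤ ·) → ys.Pairwise (· ≤ ·) →
    mergeCountAux k xs ys = (ys.map (fun y => ((xs.count y : Int)))).sum := by
  intro k
  induction k with
  | zero =>
    intro xs ys hk _ _
    have hx : xs = [] := by cases xs <;> simp_all
    have hy : ys = [] := by cases ys <;> simp_all
    subst hx; subst hy; simp [mergeCountAux]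
  | succ k ih =>
    intro xs ys hk hx hy
    match xs, ys with
    | [], ys => simp [mergeCountAux]
    | x :: xt, [] => simp [mergeCountAux]
    | x :: xt, y :: yt =>
      rcases List.pairwise_cons.mp hx with ⟨hxle, hxt⟩
      rcases List.pairwise_cons.mp hy with ⟨hyle, hyt⟩
      rw [mergeCountAux]
      by_cases hxy : x < y
      · rw [if_pos hxy]
        rw [ih xt (y :: yt) (by simp at hk ⊢; omega) hxt hy]
        apply congrArg List.sum
        apply List.map_congr_left
        intro y' hy'
        have hyy' : y ≤ y' := by
          rcases List.mem_cons.mp hy' with h | h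
          · omega
          · exact hyle y' h
        rw [List.count_cons_of_ne (by omega)]
      · rw [if_neg hxy]
        by_cases hyx : y < x
        · rw [if_pos hyx]
          rw [ih (x :: xt) yt (by simp at hk ⊢; omega) hx hyt]
          simp only [List.map_cons, List.sum_cons]
          have hcnt : List.count y (x :: xt) = 0 := List.count_eq_zero.mpr (by
            intro hmem
            rcases List.mem_cons.mp hmem with h | h
            · omega
            · exact absurd (hxle y h) (by omega))
          simp [hcnt]
        · rw [if_neg hyx]
          have hxeqy : x = y := by omega
          subst hxeqy
          simp only []
          have hgex : ∀ z ∈ x :: xt, x ≤ z := by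
            intro z hz
            rcases List.mem_cons.mp hz with h | h
            · omega
            · exact hxle z h
          have hgey : ∀ z ∈ x :: yt, x ≤ z := by
            intro z hz
            rcases List.mem_cons.mp hz with h | h
            · omega
            · exact hyle z h
          obtain ⟨hcx, hdx⟩ := sorted_head_split x (x :: xt) hx hgex
          obtain ⟨hcy, hdy⟩ := sorted_head_split x (x :: yt) hy hgey
          set xs' := (x :: xt).dropWhile (fun z => z == x) with hxs'
          set ys' := (x :: yt).dropWhile (fun z => z == x) with hys'
          have hxsplit : (x :: xt).takeWhile (fun z => z == x) ++ xs' = x :: xt :=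
            List.takeWhile_append_dropWhile
          have hysplit : (x :: yt).takeWhile (fun z => z == x) ++ ys' = x :: yt :=
            List.takeWhile_append_dropWhile
          have hxs'len : xs'.length ≤ xt.length := by
            rw [hxs', List.dropWhile_cons_of_pos (by simp)]
            exact List.length_dropWhile_le _ _
          have hys'len : ys'.length ≤ yt.length := by
            rw [hys', List.dropWhile_cons_of_pos (by simp)]
            exact List.length_dropWhile_le _ _
          have hxs'p : xs'.Pairwise (· ≤ ·) := hx.sublist (List.dropWhile_sublist _)
          have hys'p : ys'.Pairwise (· ≤ ·) := hy.sublist (List.dropWhile_sublist _)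
          rw [ih xs' ys' (by simp at hk ⊢; omega) hxs'p hys'p]
          conv_rhs => rw [← hysplit]
          rw [List.map_append, List.sum_append]
          have hmapc : ((x :: yt).takeWhile (fun z => z == x)).map
                (fun y => ((List.count y (x :: xt) : Int)))
              = ((x :: yt).takeWhile (fun z => z == x)).map
                (fun _ => ((List.count x (x :: xt) : Int))) := by
            apply List.map_congr_left
            intro s hs
            have := List.mem_takeWhile_imp hs
            simp only [beq_iff_eq] at this
            rw [this]
          have hys'part : (ys'.map (fun y => (((x :: xt).count y : Int)))).sum
              = (ys'.map (fun y => ((xs'.count y : Int)))).sum := by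
            apply congrArg List.sum
            apply List.map_congr_left
            intro y' hy'
            have hxy' : x < y' := hdy y' hy'
            conv_lhs => rw [← hxsplit]
            rw [List.count_append]
            have hz : List.count y' ((x :: xt).takeWhile (fun z => z == x)) = 0 :=
              List.count_eq_zero.mpr (by
                intro hmem
                have := List.mem_takeWhile_imp hmem
                simp only [beq_iff_eq] at this
                omega)
            rw [hz]
            simp
          rw [hmapc, PySem.List.sum_map_const_int, hys'part, ← hcx]
          ring

-- the sorted-merge side computes the cross-matching sum
theorem merge_side (T : Int) (SA SB : List Int) :
    mergeCount (PySem.List.sorted SA (fun x => x) false)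
               (PySem.List.sorted (SB.map (fun s => T - s)) (fun x => x) false)
      = (SB.map (fun s => ((SA.count (T - s) : Int)))).sum := by
  have hpx : (PySem.List.sorted SA (fun x => x) false).Pairwise (· ≤ ·) := by
    have := PySem.List.sorted_pairwise (xs := SA) (key := fun x => x)
    simpa using this
  have hpy : (PySem.List.sorted (SB.map (fun s => T - s)) (fun x => x) false).Pairwise (· ≤ ·) := by
    have := PySem.List.sorted_pairwise (xs := SB.map (fun s => T - s)) (key := fun x => x)
    simpa using this
  rw [show mergeCount (PySem.List.sorted SA (fun x => x) false)
        (PySem.List.sorted (SB.map (fun s => T - s)) (fun x => x) false)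
      = mergeCountAux _ _ _ from rfl]
  rw [mergeCountAux_eq _ _ _ le_rfl hpx hpy]
  have hperm1 := PySem.List.sorted_perm (xs := SA) (key := fun x => x) (rev := false)
  have hperm2 := PySem.List.sorted_perm (xs := SB.map (fun s => T - s)) (key := fun x => x)
    (rev := false)
  have h1 : (List.map (fun y => ((List.count y (PySem.List.sorted SA (fun x => x) false) : Int)))
        (PySem.List.sorted (List.map (fun s => T - s) SB) (fun x => x) false))
      = (List.map (fun y => ((List.count y SA : Int)))
        (PySem.List.sorted (List.map (fun s => T - s) SB) (fun x => x) false)) := by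
    apply List.map_congr_left
    intro y _
    rw [hperm1.count_eq y]
  rw [h1]
  rw [(hperm2.map (fun y => ((List.count y SA : Int)))).sum_eq]
  rw [List.map_map]
  simp only [Function.comp_def]

-- ===== VERDICT (by name: the statement is the Claim_ definition above) =====
theorem solution_spec : Claim_equal_solution := by
  unfold Claim_equal_solution
  intro T n A m B hDom hPre
  obtain ⟨hA, hB⟩ := hPre
  unfold Spec_solution
  have e1 : solution T n A m B = finalA T (dictA A n) (dictA B m) := rfl
  have e2 : solution_alt T n A m B
      = mergeCount (PySem.List.sorted (genList (fun s => s) A n) (fun x => x) false)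
          (PySem.List.sorted (genList (fun s => T - s) B m) (fun x => x) false) := rfl
  rw [e1, e2, dictA_eq A n hA, dictA_eq B m hB,
      genList_eq (fun s => s) A n hA, genList_eq (fun s => T - s) B m hB,
      finalA_counter, cross, List.map_id', merge_side]
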